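-- pv_equiv track=rewrite | github.com/noachilles/Algorithm | 프로그래머스/3/60059. 자물쇠와 열쇠/자물쇠와 열쇠.py | solution
-- ===== SOURCE A (Python) =====
-- def rotate(key):
--     m = len(key)
--     temp_key = [[0] * m for _ in range(m)]
--     for r in range(m):
--         for c in range(m):
--             temp_key[c][m - 1 -r] = key[r][c]
--     return temp_key
--
-- def check(temp_lock):
--     n = len(temp_lock) // 3
--     for r in range(n, 2 * n):
--         for c in range(n, 2 * n):
--             if temp_lock[r][c] != 1:
--                 return False
--     return True
--
-- def solution(key, lock):
--     answer = True
--     n = len(lock)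
--     m = len(key)
--
--     temp_lock = [[0] * (n * 3) for _ in range(n * 3)]
--     for r in range(n):
--         for c in range(n):
--             temp_lock[r + n][c + n] = lock[r][c]
--     for rotation in range(4):
--         key = rotate(key)
--         for x in range(n * 2):
--             for y in range(n * 2):
--                 # 자물쇠에 열쇠 끼워 넣기
--                 for i in range(m):
--                     for j in range(m):
--                         temp_lock[x + i][y + j] += key[i][j]
--                 if check(temp_lock) == True:
--                     return True
--                 # 자물쇠에서 열쇠를 다시 빼기
--                 for i in range(m):
--                     for j in range(m):
--                         temp_lock[x + i][y + j] -= key[i][j]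
--     return False
-- ===== SOURCE B (Python) =====
-- def solution(key, lock):
--     n, m = len(lock), len(key)
--     k = key
--     for _ in range(4):
--         # rotate clockwise: entry (i, j) of the rotated key is key[m-1-j][i]
--         k = [[k[m - 1 - j][i] for j in range(m)] for i in range(m)]
--         for x in range(2 * n):
--             for y in range(2 * n):
--                 if all(lock[r][c]
--                        + (k[n + r - x][n + c - y]
--                           if x <= n + r < x + m and y <= n + c < y + m else 0) == 1
--                        for r in range(n) for c in range(n)):
--                     return True
--     return False
-- ===== Notes on version B (the rewrite author's own statement) =====
-- stated objective: simpler
-- what changed: B drops A's mutable 3n x 3n board with its add/check/subtract passes and instead tests each rotation/offset directly with one short-circuiting closed-form per-cell condition (lock[r][c] plus the key bump landing there must equal 1), never materialising or mutating a board.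
import Mathlib
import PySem

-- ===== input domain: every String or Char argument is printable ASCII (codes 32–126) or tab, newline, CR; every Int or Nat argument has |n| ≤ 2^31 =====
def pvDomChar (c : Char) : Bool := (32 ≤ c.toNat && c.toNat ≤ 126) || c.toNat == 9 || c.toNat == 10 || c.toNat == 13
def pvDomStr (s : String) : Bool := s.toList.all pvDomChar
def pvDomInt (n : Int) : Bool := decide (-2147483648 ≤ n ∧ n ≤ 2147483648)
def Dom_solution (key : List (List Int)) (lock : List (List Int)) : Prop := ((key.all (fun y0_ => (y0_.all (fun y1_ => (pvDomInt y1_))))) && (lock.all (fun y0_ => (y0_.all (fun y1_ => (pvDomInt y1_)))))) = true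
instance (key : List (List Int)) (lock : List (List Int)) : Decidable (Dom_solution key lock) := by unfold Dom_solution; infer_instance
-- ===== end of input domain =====

-- B drops A's mutable 3n×3n board and its add/check/subtract passes: it tests each rotation/offset
-- with one closed-form per-cell condition instead (objective: simpler; no speed claim).

-- ===== PORT A =====
-- Python's lst[r][c] read and write on a list-of-lists board, made total via getD / List.set
-- (Python raises IndexError out of range; Pre_solution excludes exactly those inputs, so the
-- total fallback is never observed on admitted inputs).
def bget (b : List (List Int)) (r c : Nat) : Int := (b.getD r []).getD c 0
def bset (b : List (List Int)) (r c : Nat) (v : Int) : List (List Int) :=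
  b.set r ((b.getD r []).set c v)

def rotateA (key : List (List Int)) : List (List Int) :=
  let m := key.length
  (List.range m).foldl (fun tk r =>
      (List.range m).foldl (fun tk c => bset tk c (m - 1 - r) (bget key r c)) tk)
    (List.replicate m (List.replicate m 0))

-- Python's `for r in range(n, 2*n)` iterated as n + dr with dr ∈ range n (same cells, same order)
def checkA (tl : List (List Int)) : Bool :=
  let n := tl.length / 3
  (List.range n).all fun dr => (List.range n).all fun dc => bget tl (n + dr) (n + dc) == 1

def addA (tl key : List (List Int)) (x y m : Nat) : List (List Int) :=
  (List.range m).foldl (fun tl i =>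
    (List.range m).foldl (fun tl j =>
      bset tl (x + i) (y + j) (bget tl (x + i) (y + j) + bget key i j)) tl) tl

def subA (tl key : List (List Int)) (x y m : Nat) : List (List Int) :=
  (List.range m).foldl (fun tl i =>
    (List.range m).foldl (fun tl j =>
      bset tl (x + i) (y + j) (bget tl (x + i) (y + j) - bget key i j)) tl) tl

-- the (x, y) offset pairs of A's two nested loops, in A's order
def offsets (n : Nat) : List (Nat × Nat) :=
  (List.range (2 * n)).flatMap fun x => (List.range (2 * n)).map fun y => (x, y)

def tryA (key : List (List Int)) (m : Nat) :
    List (Nat × Nat) → List (List Int) → Bool × List (List Int)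
  | [], tl => (false, tl)
  | p :: rest, tl =>
    let tl1 := addA tl key p.1 p.2 m
    if checkA tl1 then (true, tl1)
    else tryA key m rest (subA tl1 key p.1 p.2 m)

def rotA (n m : Nat) : Nat → List (List Int) → List (List Int) → Bool
  | 0, _, _ => false
  | Nat.succ k, key, tl =>
    let key1 := rotateA key
    match tryA key1 m (offsets n) tl with
    | (true, _) => true
    | (false, tl1) => rotA n m k key1 tl1

def solution (key : List (List Int)) (lock : List (List Int)) : Bool :=
  let n := lock.length
  let m := key.length
  let base := (List.range n).foldl (fun tl r =>
      (List.range n).foldl (fun tl c => bset tl (r + n) (c + n) (bget lock r c)) tl)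
    (List.replicate (3 * n) (List.replicate (3 * n) 0))
  rotA n m 4 key base

-- ===== PORT B =====
def rotateB (k : List (List Int)) : List (List Int) :=
  let m := k.length
  (List.range m).map fun i => (List.range m).map fun j => bget k (m - 1 - j) i

def fitsB (lock k : List (List Int)) (n m x y : Nat) : Bool :=
  (List.range n).all fun r => (List.range n).all fun c =>
    bget lock r c +
      (if x ≤ n + r ∧ n + r < x + m ∧ y ≤ n + c ∧ n + c < y + m
       then bget k (n + r - x) (n + c - y) else 0) == 1

def rotB (lock : List (List Int)) (n m : Nat) : Nat → List (List Int) → Bool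
  | 0, _ => false
  | Nat.succ t, k =>
    let k1 := rotateB k
    if (offsets n).any (fun p => fitsB lock k1 n m p.1 p.2) then true
    else rotB lock n m t k1

def solution_alt (key : List (List Int)) (lock : List (List Int)) : Bool :=
  rotB lock lock.length key.length 4 key

-- ===== PRECONDITION & SPEC =====
-- Pre_ excludes exactly the inputs on which the Python A raises IndexError, nothing else: a key
-- row shorter than len(key), a lock row shorter than len(lock), or a key more than one wider
-- than the lock — except (last disjunct) the oversized keys on which A still returns True
-- before its scan reaches an out-of-range offset, namely when the once-rotated key already
-- fills the lock at some offset (0, y) with y + m ≤ 3n; those inputs stay inside Pre_.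
def Pre_solution (key : List (List Int)) (lock : List (List Int)) : Prop :=
  (∀ row ∈ key, key.length ≤ row.length) ∧ (∀ row ∈ lock, lock.length ≤ row.length) ∧
  (key.length ≤ lock.length + 1 ∨ lock.length = 0 ∨
    ∃ y ∈ List.range (2 * lock.length), y + key.length ≤ 3 * lock.length ∧
      ∀ r ∈ List.range lock.length, ∀ c ∈ List.range lock.length,
        ((lock.getD r []).getD c 0) +
          (if lock.length + r < key.length ∧ y ≤ lock.length + c ∧
              lock.length + c < y + key.length
           then (key.getD (key.length - 1 - (lock.length + c - y)) []).getD
                  (lock.length + r) 0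
           else 0) = 1)
instance (key : List (List Int)) (lock : List (List Int)) : Decidable (Pre_solution key lock) := by
  unfold Pre_solution; infer_instance

def pvWitness_solution : List (List Int) × List (List Int) := ([[1]], [[0]])

def Spec_solution (key : List (List Int)) (lock : List (List Int)) (out : Bool) : Prop := out = solution_alt key lock
instance (key : List (List Int)) (lock : List (List Int)) (out : Bool) : Decidable (Spec_solution key lock out) := by unfold Spec_solution; infer_instance

-- ===== CLAIM (what is proved, stated in full; the proofs are below) =====
def Claim_equal_solution : Prop := ∀ (key : List (List Int)) (lock : List (List Int)), Dom_solution key lock → Pre_solution key lock → Spec_solution key lock (solution key lock)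

-- ===== LEMMAS AND PROOFS =====

-- uniform R×C shape of a board
def Shaped (b : List (List Int)) (R C : Nat) : Prop :=
  b.length = R ∧ ∀ i, i < R → (b.getD i []).length = C

theorem shaped_replicate (R C : Nat) : Shaped (List.replicate R (List.replicate C (0 : Int))) R C := by
  refine ⟨by simp, fun i hi => ?_⟩
  rw [List.getD_eq_getElem _ _ (by simpa using hi)]
  simp

theorem brow_bset_ne {b : List (List Int)} {r0 c0 r : Nat} {v : Int} (h : r0 ≠ r) :
    (bset b r0 c0 v).getD r [] = b.getD r [] := by
  simp [bset, List.getD_eq_getElem?_getD, List.getElem?_set_ne h]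

theorem brow_bset_self {b : List (List Int)} {r c : Nat} {v : Int} (h : r < b.length) :
    (bset b r c v).getD r [] = (b.getD r []).set c v := by
  simp [bset, List.getD_eq_getElem?_getD, List.getElem?_set_self (by simpa using h)]

theorem bset_out {b : List (List Int)} {r c : Nat} {v : Int} (h : b.length ≤ r) :
    bset b r c v = b :=
  List.set_eq_of_length_le h

theorem bget_out {b : List (List Int)} {R C r c : Nat} (hs : Shaped b R C)
    (h : R ≤ r ∨ C ≤ c) : bget b r c = 0 := by
  have hb : b.length = R := hs.1
  unfold bget
  rcases h with h | h
  · rw [show b.getD r [] = [] from List.getD_eq_default _ _ (by omega)]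
    simp
  · by_cases hr : r < R
    · exact List.getD_eq_default _ _ (by rw [hs.2 r hr]; omega)
    · rw [show b.getD r [] = [] from List.getD_eq_default _ _ (by omega)]
      simp

theorem shaped_bset {b : List (List Int)} {R C : Nat} (hs : Shaped b R C) (r c : Nat) (v : Int) :
    Shaped (bset b r c v) R C := by
  refine ⟨by simp [bset, hs.1], fun i hi => ?_⟩
  by_cases hir : r = i
  · subst hir
    by_cases hlt : r < b.length
    · rw [brow_bset_self hlt]
      rw [List.length_set]
      exact hs.2 r hi
    · rw [bset_out (by omega)]
      exact hs.2 r hi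
  · rw [brow_bset_ne hir]
    exact hs.2 i hi

theorem bget_bset_ne {b : List (List Int)} {r0 c0 r c : Nat} (h : (r0, c0) ≠ (r, c)) (v : Int) :
    bget (bset b r0 c0 v) r c = bget b r c := by
  unfold bget
  by_cases hr : r0 = r
  · subst hr
    have hc : c0 ≠ c := fun hc => h (by rw [hc])
    by_cases hlt : r0 < b.length
    · rw [brow_bset_self hlt]
      simp [List.getD_eq_getElem?_getD, List.getElem?_set_ne hc]
    · rw [bset_out (by omega)]
  · rw [brow_bset_ne hr]

theorem bget_bset_self {b : List (List Int)} {R C r c : Nat} (hs : Shaped b R C)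
    (hr : r < R) (hc : c < C) (v : Int) : bget (bset b r c v) r c = v := by
  have hb : b.length = R := hs.1
  unfold bget
  rw [brow_bset_self (by omega : r < b.length)]
  have hcl : c < (b.getD r []).length := by rw [hs.2 r hr]; exact hc
  rw [List.getD_eq_getElem _ _ (by simpa using hcl)]
  simp
-- a pass writing h r c (old value) at each cell of `cells`
def writeFold (h : Nat → Nat → Int → Int) (cells : List (Nat × Nat)) (b : List (List Int)) :
    List (List Int) :=
  cells.foldl (fun b p => bset b p.1 p.2 (h p.1 p.2 (bget b p.1 p.2))) b

theorem shaped_writeFold {R C : Nat} (h : Nat → Nat → Int → Int) (cells : List (Nat × Nat))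
    {b : List (List Int)} (hs : Shaped b R C) : Shaped (writeFold h cells b) R C := by
  induction cells generalizing b with
  | nil => exact hs
  | cons p rest ih => exact ih (shaped_bset hs p.1 p.2 _)

theorem writeFold_cons (h : Nat → Nat → Int → Int) (p : Nat × Nat)
    (rest : List (Nat × Nat)) (b : List (List Int)) :
    writeFold h (p :: rest) b =
      writeFold h rest (bset b p.1 p.2 (h p.1 p.2 (bget b p.1 p.2))) := rfl

theorem bget_writeFold_notMem (h : Nat → Nat → Int → Int) {cells : List (Nat × Nat)}
    {r c : Nat} (hmem : (r, c) ∉ cells) (b : List (List Int)) :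
    bget (writeFold h cells b) r c = bget b r c := by
  induction cells generalizing b with
  | nil => rfl
  | cons p rest ih =>
    have h1 : (r, c) ∉ rest := fun hx => hmem (List.mem_cons_of_mem _ hx)
    have h2 : p ≠ (r, c) := fun hx => hmem (by rw [← hx]; exact List.mem_cons_self)
    rw [writeFold_cons, ih h1, bget_bset_ne h2]

theorem bget_writeFold {R C : Nat} (h : Nat → Nat → Int → Int) {cells : List (Nat × Nat)}
    (hnd : cells.Nodup) {b : List (List Int)} (hs : Shaped b R C) {r c : Nat}
    (hr : r < R) (hc : c < C) :
    bget (writeFold h cells b) r c =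
      if (r, c) ∈ cells then h r c (bget b r c) else bget b r c := by
  induction cells generalizing b with
  | nil => simp [writeFold]
  | cons p rest ih =>
    have hnd' : rest.Nodup := hnd.of_cons
    have hpn : p ∉ rest := (List.nodup_cons.mp hnd).1
    rw [writeFold_cons]
    by_cases hp : p = (r, c)
    · subst hp
      rw [bget_writeFold_notMem h hpn, bget_bset_self hs hr hc]
      simp
    · have hne : ¬ ((r, c) = p) := fun hh => hp hh.symm
      rw [ih hnd' (shaped_bset hs p.1 p.2 _), bget_bset_ne hp]
      simp [List.mem_cons, hne]

-- the cells written by one add/sub pass at offset (x, y)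
def rectCells (x y m : Nat) : List (Nat × Nat) :=
  (List.range m).flatMap fun i => (List.range m).map fun j => (x + i, y + j)

theorem mem_rectCells {x y m r c : Nat} :
    (r, c) ∈ rectCells x y m ↔ x ≤ r ∧ r < x + m ∧ y ≤ c ∧ c < y + m := by
  simp only [rectCells, List.mem_flatMap, List.mem_map, List.mem_range, Prod.mk.injEq]
  constructor
  · rintro ⟨i, hi, j, hj, h1, h2⟩
    omega
  · rintro ⟨h1, h2, h3, h4⟩
    exact ⟨r - x, by omega, c - y, by omega, by omega, by omega⟩

theorem nodup_rectCells (x y m : Nat) : (rectCells x y m).Nodup := by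
  rw [rectCells, List.nodup_flatMap]
  constructor
  · intro i _
    exact List.nodup_range.map (fun a b hab => by
      have := Prod.mk.injEq .. ▸ hab
      omega)
  · refine List.pairwise_lt_range.imp ?_
    intro i1 i2 h12 p hp1 hp2
    simp only [List.mem_map, List.mem_range] at hp1 hp2
    obtain ⟨j1, _, e1⟩ := hp1
    obtain ⟨j2, _, e2⟩ := hp2
    rw [← e2] at e1
    have := Prod.mk.injEq .. ▸ e1
    omega

-- the cells written by one rotate pass
def rotCells (m : Nat) : List (Nat × Nat) :=
  (List.range m).flatMap fun r => (List.range m).map fun c => (c, m - 1 - r)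

theorem mem_rotCells {m i j : Nat} : (i, j) ∈ rotCells m ↔ i < m ∧ j < m := by
  simp only [rotCells, List.mem_flatMap, List.mem_map, List.mem_range, Prod.mk.injEq]
  constructor
  · rintro ⟨r, hr, c, hc, h1, h2⟩
    omega
  · rintro ⟨h1, h2⟩
    exact ⟨m - 1 - j, by omega, i, h1, rfl, by omega⟩

theorem nodup_rotCells (m : Nat) : (rotCells m).Nodup := by
  rw [rotCells, List.nodup_flatMap]
  constructor
  · intro r hr
    exact List.nodup_range.map (fun a b hab => by
      have := Prod.mk.injEq .. ▸ hab
      omega)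
  · refine List.Pairwise.imp_of_mem ?_ List.pairwise_lt_range
    intro r1 r2 hm1 hm2 h12 p hp1 hp2
    simp only [List.mem_range] at hm1 hm2
    simp only [List.mem_map, List.mem_range] at hp1 hp2
    obtain ⟨c1, hc1, e1⟩ := hp1
    obtain ⟨c2, hc2, e2⟩ := hp2
    rw [← e2] at e1
    have := Prod.mk.injEq .. ▸ e1
    omega

theorem foldl_flatMap {α β γ : Type} (l : List α) (f : α → List β) (g : γ → β → γ) (init : γ) :
    (l.flatMap f).foldl g init = l.foldl (fun acc a => (f a).foldl g acc) init := by
  induction l generalizing init with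
  | nil => rfl
  | cons a l ih => simp only [List.flatMap_cons, List.foldl_append, List.foldl_cons, ih]

theorem addA_eq (tl key : List (List Int)) (x y m : Nat) :
    addA tl key x y m =
      writeFold (fun r c v => v + bget key (r - x) (c - y)) (rectCells x y m) tl := by
  rw [addA, writeFold, rectCells, foldl_flatMap]
  simp only [List.foldl_map, Nat.add_sub_cancel_left]

theorem subA_eq (tl key : List (List Int)) (x y m : Nat) :
    subA tl key x y m =
      writeFold (fun r c v => v - bget key (r - x) (c - y)) (rectCells x y m) tl := by
  rw [subA, writeFold, rectCells, foldl_flatMap]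
  simp only [List.foldl_map, Nat.add_sub_cancel_left]

theorem bget_zeros (m i j : Nat) :
    bget (List.replicate m (List.replicate m (0 : Int))) i j = 0 := by
  unfold bget
  by_cases hi : i < m
  · rw [List.getD_replicate (h := hi)]
    by_cases hj : j < m
    · rw [List.getD_replicate (h := hj)]
    · exact List.getD_eq_default _ _ (by simpa using Nat.le_of_not_lt hj)
  · rw [show (List.replicate m (List.replicate m (0:Int))).getD i [] = [] from
        List.getD_eq_default _ _ (by simpa using Nat.le_of_not_lt hi)]
    rfl

theorem board_ext {b1 b2 : List (List Int)} {R C : Nat} (h1 : Shaped b1 R C)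
    (h2 : Shaped b2 R C)
    (h : ∀ r, r < R → ∀ c, c < C → bget b1 r c = bget b2 r c) : b1 = b2 := by
  have hlen : b1.length = b2.length := h1.1.trans h2.1.symm
  apply List.ext_getElem hlen
  intro i hi1 hi2
  have hri : i < R := h1.1 ▸ hi1
  have e1 : b1.getD i [] = b1[i] := List.getD_eq_getElem _ _ hi1
  have e2 : b2.getD i [] = b2[i] := List.getD_eq_getElem _ _ hi2
  have l1 : b1[i].length = C := e1 ▸ h1.2 i hri
  have l2 : b2[i].length = C := e2 ▸ h2.2 i hri
  apply List.ext_getElem (l1.trans l2.symm)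
  intro j hj1 hj2
  have hcj : j < C := l1 ▸ hj1
  have hv := h i hri j hcj
  unfold bget at hv
  rw [e1, e2, List.getD_eq_getElem _ _ hj1, List.getD_eq_getElem _ _ hj2] at hv
  exact hv

theorem shaped_rotateB (k : List (List Int)) : Shaped (rotateB k) k.length k.length := by
  refine ⟨by simp [rotateB], fun i hi => ?_⟩
  rw [show (rotateB k).getD i [] =
        (List.range k.length).map (fun j => bget k (k.length - 1 - j) i) from by
      rw [rotateB]
      rw [List.getD_eq_getElem _ _ (by simpa using hi)]
      simp]
  simp

theorem bget_rotateB {k : List (List Int)} {i j : Nat} (hi : i < k.length)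
    (hj : j < k.length) : bget (rotateB k) i j = bget k (k.length - 1 - j) i := by
  unfold bget
  rw [show (rotateB k).getD i [] =
        (List.range k.length).map (fun j => bget k (k.length - 1 - j) i) from by
      rw [rotateB]
      rw [List.getD_eq_getElem _ _ (by simpa using hi)]
      simp]
  rw [List.getD_eq_getElem _ _ (by simpa using hj)]
  simp [bget, List.getD_eq_getElem?_getD]

theorem rotateA_eq (key : List (List Int)) : rotateA key = rotateB key := by
  have hw : rotateA key =
      writeFold (fun i j v => bget key (key.length - 1 - j) i) (rotCells key.length)
        (List.replicate key.length (List.replicate key.length 0)) := by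
    rw [rotateA, writeFold, rotCells, foldl_flatMap]
    refine PySem.List.foldl_congr_mem _ _ _ _ ?_
    intro acc r hr
    rw [List.foldl_map]
    refine PySem.List.foldl_congr_mem _ _ _ _ ?_
    intro acc2 c _
    have : key.length - 1 - (key.length - 1 - r) = r := by
      simp only [List.mem_range] at hr
      omega
    rw [this]
  rw [hw]
  refine board_ext (R := key.length) (C := key.length)
    (shaped_writeFold _ _ (shaped_replicate _ _)) (shaped_rotateB key) ?_
  intro r hr c hc
  rw [bget_writeFold _ (nodup_rotCells _) (shaped_replicate _ _) hr hc]
  rw [if_pos (mem_rotCells.mpr ⟨hr, hc⟩), bget_rotateB hr hc]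

theorem baseA_eq (lock : List (List Int)) (n : Nat) :
    (List.range n).foldl (fun tl r =>
        (List.range n).foldl (fun tl c => bset tl (r + n) (c + n) (bget lock r c)) tl)
      (List.replicate (3*n) (List.replicate (3*n) 0)) =
    writeFold (fun r c _ => bget lock (r - n) (c - n)) (rectCells n n n)
      (List.replicate (3*n) (List.replicate (3*n) 0)) := by
  rw [writeFold, rectCells, foldl_flatMap]
  refine PySem.List.foldl_congr_mem _ _ _ _ ?_
  intro acc r _
  rw [List.foldl_map]
  refine PySem.List.foldl_congr_mem _ _ _ _ ?_
  intro acc2 c _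
  simp only [Nat.add_sub_cancel_left]
  rw [Nat.add_comm n r, Nat.add_comm n c]

theorem bget_base (lock : List (List Int)) (n r c : Nat) :
    bget (writeFold (fun r c _ => bget lock (r - n) (c - n)) (rectCells n n n)
        (List.replicate (3*n) (List.replicate (3*n) 0))) r c =
      if n ≤ r ∧ r < 2*n ∧ n ≤ c ∧ c < 2*n then bget lock (r - n) (c - n) else 0 := by
  by_cases h3 : r < 3*n ∧ c < 3*n
  · rw [bget_writeFold _ (nodup_rectCells n n n) (shaped_replicate (3*n) (3*n)) h3.1 h3.2]
    by_cases hm : (r, c) ∈ rectCells n n n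
    · have := mem_rectCells.mp hm
      rw [if_pos hm, if_pos (by omega)]
    · rw [if_neg hm, bget_zeros, if_neg (fun hcon => hm (mem_rectCells.mpr (by omega)))]
  · rw [bget_out (shaped_writeFold _ _ (shaped_replicate (3*n) (3*n))) (by omega),
        if_neg (by omega)]

theorem checkA_addA (lock key1 tl : List (List Int)) {n : Nat} (m x y : Nat)
    (hs : Shaped tl (3*n) (3*n))
    (hb : ∀ r c, bget tl r c =
      if n ≤ r ∧ r < 2*n ∧ n ≤ c ∧ c < 2*n then bget lock (r - n) (c - n) else 0) :
    checkA (addA tl key1 x y m) = fitsB lock key1 n m x y := by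
  have hs1 : Shaped (addA tl key1 x y m) (3*n) (3*n) := by
    rw [addA_eq]; exact shaped_writeFold _ _ hs
  have hval : ∀ r c, r < n → c < n →
      bget (addA tl key1 x y m) (n + r) (n + c) =
        bget lock r c +
          (if x ≤ n + r ∧ n + r < x + m ∧ y ≤ n + c ∧ n + c < y + m
           then bget key1 (n + r - x) (n + c - y) else 0) := by
    intro r c hr hc
    rw [addA_eq, bget_writeFold _ (nodup_rectCells x y m) hs (by omega) (by omega)]
    by_cases hm : (n + r, n + c) ∈ rectCells x y m
    · have := mem_rectCells.mp hm
      rw [if_pos hm, if_pos (by omega), hb, if_pos (by omega)]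
      simp only [Nat.add_sub_cancel_left]
    · rw [if_neg hm, if_neg (fun h => hm (mem_rectCells.mpr (by omega))), hb,
          if_pos (by omega)]
      simp only [Nat.add_sub_cancel_left, add_zero]
  unfold checkA fitsB
  rw [hs1.1, Nat.mul_div_cancel_left n (by norm_num)]
  rw [Bool.eq_iff_iff]
  simp only [List.all_eq_true, List.mem_range]
  refine forall_congr' fun r => ?_
  refine forall_congr' fun hrm => ?_
  refine forall_congr' fun c => ?_
  refine forall_congr' fun hcm => ?_
  rw [hval r c hrm hcm]

theorem subA_addA (tl key1 : List (List Int)) {n : Nat} (m x y : Nat)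
    (hs : Shaped tl (3*n) (3*n)) :
    subA (addA tl key1 x y m) key1 x y m = tl := by
  have hs1 : Shaped (addA tl key1 x y m) (3*n) (3*n) := by
    rw [addA_eq]; exact shaped_writeFold _ _ hs
  have hs2 : Shaped (subA (addA tl key1 x y m) key1 x y m) (3*n) (3*n) := by
    rw [subA_eq]; exact shaped_writeFold _ _ hs1
  refine board_ext hs2 hs ?_
  intro r hr c hc
  rw [subA_eq, bget_writeFold _ (nodup_rectCells x y m) hs1 hr hc]
  by_cases hm : (r, c) ∈ rectCells x y m
  · rw [if_pos hm, addA_eq, bget_writeFold _ (nodup_rectCells x y m) hs hr hc, if_pos hm]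
    ring
  · rw [if_neg hm, addA_eq, bget_writeFold _ (nodup_rectCells x y m) hs hr hc, if_neg hm]

theorem tryA_spec (lock key1 : List (List Int)) {n : Nat} (m : Nat)
    (offs : List (Nat × Nat)) (tl : List (List Int)) (hs : Shaped tl (3*n) (3*n))
    (hb : ∀ r c, bget tl r c =
      if n ≤ r ∧ r < 2*n ∧ n ≤ c ∧ c < 2*n then bget lock (r - n) (c - n) else 0) :
    (tryA key1 m offs tl).1 = offs.any (fun p => fitsB lock key1 n m p.1 p.2) ∧
      (offs.any (fun p => fitsB lock key1 n m p.1 p.2) = false →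
        (tryA key1 m offs tl).2 = tl) := by
  induction offs with
  | nil => exact ⟨rfl, fun _ => rfl⟩
  | cons p rest ih =>
    have hcheck : checkA (addA tl key1 p.1 p.2 m) = fitsB lock key1 n m p.1 p.2 :=
      checkA_addA lock key1 tl m p.1 p.2 hs hb
    have hrw : subA (addA tl key1 p.1 p.2 m) key1 p.1 p.2 m = tl := subA_addA tl key1 m p.1 p.2 hs
    by_cases hf : fitsB lock key1 n m p.1 p.2 = true
    · constructor
      · simp [tryA, hcheck, hf]
      · intro hany
        simp [hf] at hany
    · constructor
      · simp [tryA, hcheck, hf, hrw, ih.1]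
      · intro hany
        simp only [List.any_cons, hf, Bool.false_or] at hany
        simp [tryA, hcheck, hf, hrw, ih.2 hany]

theorem rot_eq (lock : List (List Int)) (n m : Nat) (base : List (List Int))
    (hs : Shaped base (3*n) (3*n))
    (hb : ∀ r c, bget base r c =
      if n ≤ r ∧ r < 2*n ∧ n ≤ c ∧ c < 2*n then bget lock (r - n) (c - n) else 0)
    (fuel : Nat) (key1 : List (List Int)) :
    rotA n m fuel key1 base = rotB lock n m fuel key1 := by
  induction fuel generalizing key1 with
  | zero => rfl
  | succ k ih =>
    obtain ⟨h1, h2⟩ := tryA_spec lock (rotateA key1) m (offsets n) base hs hb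
    cases htry : tryA (rotateA key1) m (offsets n) base with
    | mk b tl' =>
      rw [htry] at h1 h2
      simp only at h1 h2
      cases b with
      | true =>
        simp only [rotA, rotB, htry, ← rotateA_eq key1, ← h1]
        simp
      | false =>
        have htl : tl' = base := h2 h1.symm
        simp only [rotA, rotB, htry, ← rotateA_eq key1, ← h1, htl]
        simpa using ih (rotateA key1)

theorem solution_spec : Claim_equal_solution := by
  intro key lock _ _
  unfold Spec_solution
  show solution key lock = solution_alt key lock
  unfold solution solution_alt
  simp only []
  rw [baseA_eq lock lock.length]
  exact rot_eq lock lock.length key.length _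
    (shaped_writeFold _ _ (shaped_replicate (3 * lock.length) (3 * lock.length)))
    (bget_base lock lock.length) 4 key
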